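-- pv_equiv track=rewrite | github.com/kangkang005/LIBLR | LIBLR.py | regex_expand
-- ===== SOURCE A (Python) =====
-- def regex_expand(macros, pattern, guarded = True):
--     output = []
--     pos = 0
--     size = len(pattern)
--     while pos < size:
--         ch = pattern[pos]
--         if ch == '\\':
--             output.append(pattern[pos:pos + 2])
--             pos += 2
--             continue
--         elif ch != '{':
--             output.append(ch)
--             pos += 1
--             continue
--         p2 = pattern.find('}', pos)
--         if p2 < 0:
--             output.append(ch)
--             pos += 1
--             continue
--         p3 = p2 + 1
--         name = pattern[pos + 1:p2].strip('\r\n\t ')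
--         if name == '':
--             output.append(pattern[pos:p3])
--             pos = p3
--             continue
--         if name[0].isdigit():
--             output.append(pattern[pos:p3])
--             pos = p3
--             continue
--         if ('<' in name) or ('>' in name):
--             raise ValueError('invalid pattern name "%s"'%name)
--         if name not in macros:
--             raise ValueError('{%s} is undefined'%name)
--         if guarded:
--             output.append('(?:' + macros[name] + ')')
--         else:
--             output.append(macros[name])
--         pos = p3
--     return ''.join(output)
-- ===== SOURCE B (Python) =====
-- import re
--
-- _TOKEN = re.compile(r'\\[\s\S]|\{[^}]*\}')
--
-- def regex_expand(macros, pattern, guarded = True):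
--     def repl(m):
--         tok = m.group(0)
--         if tok[0] == '\\':
--             return tok
--         name = tok[1:-1].strip('\r\n\t ')
--         if name == '' or name[0].isdigit():
--             return tok
--         if ('<' in name) or ('>' in name):
--             raise ValueError('invalid pattern name "%s"' % name)
--         if name not in macros:
--             raise ValueError('{%s} is undefined' % name)
--         if guarded:
--             return '(?:' + macros[name] + ')'
--         return macros[name]
--     return _TOKEN.sub(repl, pattern)
-- ===== Notes on version B (the rewrite author's own statement) =====
-- stated objective: idiomatic
-- what changed: A's manual while-loop with pos arithmetic, str.find and slicing is replaced by a single regex-token pass: re.sub over the token pattern \\[\s\S]|\{[^}]*\} with a callback expanding each {name} group, so the per-character Python-level loop and position bookkeeping disappear into the C-level regex engine.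
import Mathlib
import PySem

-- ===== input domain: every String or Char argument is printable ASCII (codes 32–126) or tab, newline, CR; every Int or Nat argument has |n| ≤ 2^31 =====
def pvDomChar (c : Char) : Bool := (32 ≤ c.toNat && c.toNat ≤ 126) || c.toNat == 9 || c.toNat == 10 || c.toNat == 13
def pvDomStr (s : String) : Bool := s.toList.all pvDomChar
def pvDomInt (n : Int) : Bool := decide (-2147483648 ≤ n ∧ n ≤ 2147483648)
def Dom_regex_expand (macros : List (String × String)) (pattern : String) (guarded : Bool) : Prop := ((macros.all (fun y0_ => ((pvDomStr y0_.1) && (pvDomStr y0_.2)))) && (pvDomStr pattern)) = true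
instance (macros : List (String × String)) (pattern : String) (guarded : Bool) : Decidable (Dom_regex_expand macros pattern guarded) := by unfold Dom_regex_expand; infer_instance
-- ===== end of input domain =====

-- B replaces A's manual pos/find index scanning with a regex-token pass (re.sub with a
-- callback over '\\[\s\S]|\{[^}]*\}'); objective: idiomatic, not faster. A's ValueError
-- raises (and B's, which are the same) are outside Pre_; 'macros' is the Python dict given
-- as an association list (PySem.Dict.ofList, last value wins, like dict(pairs)).

def pvWs : List Char := ['\r', '\n', '\t', ' ']

-- ===== PORT A =====
-- the while-loop of A: pos walks the string; output is produced as the concatenation of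
-- the appended pieces; `none` = the ValueError raises.  pos = p3 is ported as p2.toNat + 1
-- (p3 = p2 + 1 with p2 ≥ 0 in that branch).
def pvA_loop (d : PySem.Dict String String) (cs : List Char) (guarded : Bool) (pos : Nat) :
    Option (List Char) :=
  if hlt : pos < cs.length then
    match PySem.List.pyGet? cs (pos : Int) with
    | none => none  -- unreachable: pos in range
    | some ch =>
      if ch = '\\' then
        (PySem.List.slice cs (some (pos : Int)) (some ((pos : Int) + 2)) ++ ·) <$>
          pvA_loop d cs guarded (pos + 2)
      else if ch ≠ '{' then
        ([ch] ++ ·) <$> pvA_loop d cs guarded (pos + 1)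
      else
        let p2 := PySem.Chars.findFrom cs ['}'] (pos : Int)
        if h2 : p2 < 0 then
          ([ch] ++ ·) <$> pvA_loop d cs guarded (pos + 1)
        else
          let name := PySem.Chars.stripChars
            (PySem.List.slice cs (some ((pos : Int) + 1)) (some p2)) pvWs
          if name = [] then
            (PySem.List.slice cs (some (pos : Int)) (some (p2 + 1)) ++ ·) <$>
              pvA_loop d cs guarded (p2.toNat + 1)
          else if PySem.Chars.isdigit name.head! then
            (PySem.List.slice cs (some (pos : Int)) (some (p2 + 1)) ++ ·) <$>
              pvA_loop d cs guarded (p2.toNat + 1)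
          else if ('<' ∈ name) ∨ ('>' ∈ name) then none  -- raise ValueError
          else
            match d.get? (String.mk name) with
            | none => none  -- raise ValueError ({name} is undefined)
            | some v =>
              ((if guarded then '(' :: '?' :: ':' :: v.toList ++ [')'] else v.toList) ++ ·) <$>
                pvA_loop d cs guarded (p2.toNat + 1)
  else some []
termination_by cs.length - pos
decreasing_by
  all_goals first
  | omega
  | (have hne : PySem.Chars.findFrom cs ['}'] (pos : Int) ≠ -1 := by omega
     have hs := (PySem.Chars.findFrom_natCast_spec cs ['}'] pos (by omega) hne).1
     omega)

def regex_expand (macros : List (String × String)) (pattern : String) (guarded : Bool) : String :=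
  match pvA_loop (PySem.Dict.ofList macros) pattern.toList guarded 0 with
  | some out => String.mk out
  | none => ""  -- A raises here; outside Pre_

-- ===== PORT B =====
-- B's re.sub token pass: at each position try the token regex; `\\[\s\S]` = a backslash
-- followed by any char; `\{[^}]*\}` = '{', a maximal run of non-'}' (takeWhile), a '}';
-- otherwise one char is copied verbatim.  `none` = the callback's ValueError.
def pvB_go (d : PySem.Dict String String) (guarded : Bool) : List Char → Option (List Char)
  | [] => some []
  | c :: rest =>
    if c = '\\' then
      match rest with
      | c2 :: rest' => (fun t => '\\' :: c2 :: t) <$> pvB_go d guarded rest'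
      | [] => (fun t => '\\' :: t) <$> pvB_go d guarded []  -- lone trailing backslash: no token match
    else if c = '{' then
      let inner := rest.takeWhile (· ≠ '}')
      if inner.length < rest.length then  -- a '}' closes the group
        let tail := rest.drop (inner.length + 1)
        let name := PySem.Chars.stripChars inner pvWs
        if name = [] then (fun t => '{' :: inner ++ '}' :: t) <$> pvB_go d guarded tail
        else if PySem.Chars.isdigit name.head! then
          (fun t => '{' :: inner ++ '}' :: t) <$> pvB_go d guarded tail
        else if ('<' ∈ name) ∨ ('>' ∈ name) then none  -- raise ValueError
        else
          match d.get? (String.mk name) with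
          | none => none  -- raise ValueError
          | some v =>
            (fun t => (if guarded then '(' :: '?' :: ':' :: v.toList ++ [')'] else v.toList) ++ t) <$>
              pvB_go d guarded tail
      else (fun t => '{' :: t) <$> pvB_go d guarded rest  -- unterminated '{': no token match
    else (fun t => c :: t) <$> pvB_go d guarded rest
termination_by cs => cs.length
decreasing_by all_goals first | (simp [List.length_drop]; omega) | (simp; omega) | omega | simp

def regex_expand_alt (macros : List (String × String)) (pattern : String) (guarded : Bool) : String :=
  match pvB_go (PySem.Dict.ofList macros) guarded pattern.toList with
  | some out => String.mk out
  | none => ""  -- B raises here; outside Pre_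

-- ===== PRECONDITION & SPEC =====
-- The token decomposition both scans induce on the pattern, stated once, independently of
-- either port: an escape pair '\c' (or a lone trailing '\'), a closed group '{…}' ending at
-- the first following '}', or a single literal character.
def pvTokensGo : Nat → List Char → List (List Char)
  | _, [] => []
  | 0, cs => [cs]  -- unreachable: the counter starts at the length and each token is non-empty
  | n + 1, '\\' :: c :: r => ['\\', c] :: pvTokensGo n r
  | _ + 1, ['\\'] => [['\\']]
  | n + 1, '{' :: r =>
    let inner := r.takeWhile (· ≠ '}')
    if inner.length < r.length then
      ('{' :: inner ++ ['}']) :: pvTokensGo n (r.drop (inner.length + 1))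
    else ['{'] :: pvTokensGo n r
  | n + 1, c :: r => [c] :: pvTokensGo n r

def pvTokens (cs : List Char) : List (List Char) := pvTokensGo cs.length cs

-- a closed '{…}' token is acceptable iff its stripped name is empty, digit-led, or a
-- '<'/'>'-free defined macro key; every other token is always fine
def pvTokOk (d : PySem.Dict String String) (t : List Char) : Bool :=
  match t with
  | '{' :: rest@(_ :: _) =>
    let name := PySem.Chars.stripChars rest.dropLast pvWs
    name.isEmpty || PySem.Chars.isdigit name.head! ||
      (!(decide ('<' ∈ name)) && !(decide ('>' ∈ name)) && d.contains (String.mk name))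
  | _ => true

-- Pre_ excludes exactly the inputs on which A raises ValueError: some scanned {name} group
-- has a stripped name that is non-empty, not digit-led, and contains '<'/'>' or is not a
-- macro key.  (B raises the identical ValueError there; on every input A returns, Pre_ holds.)
def Pre_regex_expand (macros : List (String × String)) (pattern : String) (guarded : Bool) : Prop :=
  ∀ t ∈ pvTokens pattern.toList, pvTokOk (PySem.Dict.ofList macros) t = true
instance (macros : List (String × String)) (pattern : String) (guarded : Bool) : Decidable (Pre_regex_expand macros pattern guarded) := by unfold Pre_regex_expand; infer_instance

def pvWitness_regex_expand : (List (String × String)) × String × Bool :=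
  ([("id", "x+")], "a{id}+\\{b", true)

def Spec_regex_expand (macros : List (String × String)) (pattern : String) (guarded : Bool) (out : String) : Prop := out = regex_expand_alt macros pattern guarded
instance (macros : List (String × String)) (pattern : String) (guarded : Bool) (out : String) : Decidable (Spec_regex_expand macros pattern guarded out) := by unfold Spec_regex_expand; infer_instance

-- ===== CLAIM (what is proved, stated in full; the proofs are below) =====
def Claim_equal_regex_expand : Prop := ∀ (macros : List (String × String)) (pattern : String) (guarded : Bool), Dom_regex_expand macros pattern guarded → Pre_regex_expand macros pattern guarded → Spec_regex_expand macros pattern guarded (regex_expand macros pattern guarded)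

-- ===== LEMMAS AND PROOFS =====

theorem pvDW_ne_nil (t : List Char) (h : '}' ∈ t) : t.dropWhile (· ≠ '}') ≠ [] :=
  fun hnil => by have := List.dropWhile_eq_nil_iff.mp hnil '}' h; simp at this

theorem pvDW_cons (t : List Char) (h : '}' ∈ t) :
    t.dropWhile (· ≠ '}') = '}' :: (t.dropWhile (· ≠ '}')).tail := by
  have hne := pvDW_ne_nil t h
  have hh : (t.dropWhile (· ≠ '}')).head hne = '}' := by
    simpa using List.head_dropWhile_not (· ≠ '}') hne
  conv_lhs => rw [← List.cons_head_tail hne]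
  rw [hh]

theorem pvDrop_takeWhile_len (t : List Char) :
    t.drop (t.takeWhile (· ≠ '}')).length = t.dropWhile (· ≠ '}') := by
  have h1 : t.drop (t.takeWhile (· ≠ '}')).length
      = ((t.takeWhile (· ≠ '}')) ++ (t.dropWhile (· ≠ '}'))).drop (t.takeWhile (· ≠ '}')).length := by
    rw [List.takeWhile_append_dropWhile]
  rw [h1, List.drop_left]

theorem pvGet_lt_takeWhile (t : List Char) (i : Nat)
    (h : i < (t.takeWhile (· ≠ '}')).length) : ∃ c, t[i]? = some c ∧ c ≠ '}' := by
  obtain ⟨r, hr⟩ := List.takeWhile_prefix (l := t) (· ≠ '}')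
  have hget : t[i]? = (t.takeWhile (· ≠ '}'))[i]? := by
    conv_lhs => rw [← hr]
    rw [List.getElem?_append_left h]
  refine ⟨(t.takeWhile (· ≠ '}'))[i], by rw [hget]; simp, ?_⟩
  have hmem : (t.takeWhile (· ≠ '}'))[i] ∈ t.takeWhile (· ≠ '}') := List.getElem_mem _
  have := List.mem_takeWhile_imp hmem
  simpa using this

theorem pvFind_rbrace_of_mem (t : List Char) (h : '}' ∈ t) :
    PySem.Chars.find t ['}'] = ((t.takeWhile (· ≠ '}')).length : Int) := by
  have hinf : ['}'] <:+: t := (List.singleton_infix_iff _ _).2 h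
  have hne : PySem.Chars.find t ['}'] ≠ -1 := by
    rw [PySem.Chars.find_ne_neg_one_iff]; exact hinf
  have hge : 0 ≤ PySem.Chars.find t ['}'] := by
    have := PySem.Chars.neg_one_le_find t ['}']; omega
  obtain ⟨hpref, hmin⟩ := PySem.Chars.find_spec hge
  set k := (t.takeWhile (· ≠ '}')).length with hk
  have hprefk : ['}'] <+: t.drop k := by
    rw [hk, pvDrop_takeWhile_len, pvDW_cons t h]
    exact ⟨_, rfl⟩
  have hnot : ∀ i < k, ¬ (['}'] <+: t.drop i) := by
    intro i hi hp
    obtain ⟨c, hc, hcne⟩ := pvGet_lt_takeWhile t i hi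
    obtain ⟨r, hr⟩ := hp
    have hhd : (t.drop i).head? = some '}' := by rw [← hr]; simp
    rw [List.head?_drop, hc] at hhd
    simp at hhd
    exact hcne hhd
  have h1 : ¬ k < (PySem.Chars.find t ['}']).toNat := fun hlt => hmin k hlt hprefk
  have h2 : ¬ (PySem.Chars.find t ['}']).toNat < k := fun hlt => hnot _ hlt hpref
  omega

theorem pvFind_rbrace_of_not_mem (t : List Char) (h : '}' ∉ t) :
    PySem.Chars.find t ['}'] = -1 := by
  rw [PySem.Chars.find_eq_neg_one_iff]
  rw [List.singleton_infix_iff]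
  exact h

theorem pvTakeWhile_eq_self_of_not_mem (rest : List Char) (h : '}' ∉ rest) :
    rest.takeWhile (· ≠ '}') = rest := by
  induction rest with
  | nil => rfl
  | cons c cr ih =>
    simp only [List.mem_cons, not_or] at h
    have hcne : c ≠ '}' := fun e => h.1 e.symm
    rw [List.takeWhile_cons]
    rw [if_pos (by simp [hcne]), ih h.2]

theorem pvLen_takeWhile_lt (rest : List Char) (h : '}' ∈ rest) :
    (rest.takeWhile (· ≠ '}')).length < rest.length := by
  by_contra hc
  have hle := (List.takeWhile_sublist (p := (· ≠ '}')) (l := rest)).length_le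
  have heq : rest.takeWhile (· ≠ '}') = rest :=
    (List.takeWhile_prefix _).eq_of_length (by omega)
  have := List.mem_takeWhile_imp (heq ▸ h)
  simp at this

theorem pvTake_eq_takeWhile (rest : List Char) :
    rest.take (rest.takeWhile (· ≠ '}')).length = rest.takeWhile (· ≠ '}') :=
  (List.prefix_iff_eq_take.mp (List.takeWhile_prefix _)).symm

theorem pvSliceTake (cs : List Char) (pos : Nat) (b : Int) (m : Nat)
    (hb : b = (pos : Int) + (m : Int)) :
    PySem.List.slice cs (some (pos : Int)) (some b) = (cs.drop pos).take m := by
  have h : b = ((pos + m : Nat) : Int) := by rw [hb]; push_cast; ring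
  rw [h, PySem.List.slice_natCast]
  congr 1
  omega

-- the two scans are equal on EVERY input (both map a raise of their Python to `none`)
theorem pvLoop_eq (d : PySem.Dict String String) (g : Bool) (cs : List Char) :
    ∀ pos : Nat, pos ≤ cs.length → pvA_loop d cs g pos = pvB_go d g (cs.drop pos) := by
  have main : ∀ n pos, cs.length - pos ≤ n → pos ≤ cs.length →
      pvA_loop d cs g pos = pvB_go d g (cs.drop pos) := by
    intro n
    induction n with
    | zero =>
      intro pos h0 hle
      rw [pvA_loop, dif_neg (by omega), List.drop_eq_nil_of_le (by omega), pvB_go]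
    | succ n ih =>
      intro pos hn hle
      by_cases hlt : pos < cs.length
      · have hget : PySem.List.pyGet? cs (pos : Int) = cs[pos]? := PySem.List.pyGet?_natCast cs pos
        have hdropc : cs.drop pos = cs[pos] :: cs.drop (pos + 1) := List.drop_eq_getElem_cons hlt
        rw [pvA_loop, dif_pos hlt, hget, List.getElem?_eq_getElem hlt, hdropc, pvB_go.eq_def]
        dsimp only
        by_cases hbs : cs[pos] = '\\'
        · -- backslash escape: token \\[\s\S] (or a lone trailing backslash)
          rw [if_pos hbs, if_pos hbs]
          have hsl := pvSliceTake cs pos ((pos : Int) + 2) 2 (by norm_num)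
          cases hr : cs.drop (pos + 1) with
          | nil =>
            dsimp only
            have hlen : cs.length ≤ pos + 1 := by
              have h2 := congrArg List.length hr
              simp only [List.length_drop, List.length_nil] at h2
              omega
            rw [pvA_loop, dif_neg (by omega)]
            rw [hsl, hdropc, hr]
            rw [pvB_go, hbs]
            rfl
          | cons c2 rest' =>
            have hlen2 : pos + 1 < cs.length := by
              by_contra hc
              rw [List.drop_eq_nil_of_le (by omega)] at hr; simp at hr
            have hdrop2 : cs.drop (pos + 2) = rest' := by
              have h2 : cs.drop (pos + 2) = (cs.drop (pos + 1)).drop 1 := by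
                rw [List.drop_drop]
              rw [h2, hr]; rfl
            dsimp only
            rw [ih (pos + 2) (by omega) (by omega), hsl, hdropc, hr, hdrop2, hbs]
            rfl
        · rw [if_neg hbs, if_neg hbs]
          by_cases hbr : cs[pos] = '{'
          · -- brace: token \{[^}]*\} when a '}' closes the group, else a literal '{'
            rw [if_neg (by simp [hbr]), if_pos hbr]
            have hff := PySem.Chars.findFrom_natCast cs ['}'] pos (by omega)
            by_cases hmem : '}' ∈ cs.drop (pos + 1)
            · -- a '}' closes the group
              set rest := cs.drop (pos + 1) with hrest
              set inner := rest.takeWhile (· ≠ '}') with hinner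
              have hmemt : '}' ∈ cs.drop pos := by rw [hdropc]; right; exact hmem
              have htw : (cs.drop pos).takeWhile (· ≠ '}') = cs[pos] :: inner := by
                rw [hdropc, List.takeWhile_cons, if_pos (by simp [hbr])]
              have hfind := pvFind_rbrace_of_mem _ hmemt
              rw [htw] at hfind
              have hklt : inner.length < rest.length := pvLen_takeWhile_lt rest hmem
              have hrlen : rest.length = cs.length - (pos + 1) := by
                rw [hrest, List.length_drop]
              have hp2v : PySem.Chars.findFrom cs ['}'] (pos : Int)
                  = (pos : Int) + ((cs[pos] :: inner).length : Int) := by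
                rw [hff, hfind]
                rw [if_neg (show ¬((((cs[pos] :: inner).length : Nat) : Int) = -1) by omega)]
              rw [hp2v]
              rw [dif_neg (show ¬((pos : Int) + (((cs[pos] :: inner).length : Nat) : Int) < 0) by omega)]
              have hp2 : ((pos : Int) + ((cs[pos] :: inner).length : Int)).toNat
                  = pos + inner.length + 1 := by simp; omega
              -- the slice pattern[pos+1:p2] is exactly inner
              have hname : PySem.List.slice cs (some ((pos : Int) + 1))
                  (some ((pos : Int) + ((cs[pos] :: inner).length : Int))) = inner := by
                have h2 : ((pos : Int) + 1) = ((pos + 1 : Nat) : Int) := by push_cast; ring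
                rw [h2, pvSliceTake cs (pos + 1) _ inner.length (by simp; push_cast; ring),
                  ← hrest, hinner]
                exact pvTake_eq_takeWhile rest
              -- the slice pattern[pos:p3] is '{' ++ inner ++ '}'
              have hrsplit : rest = inner ++ '}' :: (rest.dropWhile (· ≠ '}')).tail := by
                conv_lhs => rw [← List.takeWhile_append_dropWhile (p := (· ≠ '}')) (l := rest)]
                rw [← pvDW_cons rest hmem, hinner]
              have hsl3 : PySem.List.slice cs (some (pos : Int))
                  (some ((pos : Int) + ((cs[pos] :: inner).length : Int) + 1))
                  = cs[pos] :: (inner ++ ['}']) := by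
                rw [pvSliceTake cs pos _ (inner.length + 2) (by simp; push_cast; ring), hdropc]
                rw [List.take_succ_cons]
                congr 1
                conv_lhs => rw [hrsplit]
                simp [List.take_append]
              -- the rest of the scan after the group
              have hdropp3 : cs.drop (pos + inner.length + 1 + 1) = rest.drop (inner.length + 1) := by
                rw [hrest, List.drop_drop]
                congr 1
                omega
              rw [hp2, hname, hsl3]
              rw [if_pos hklt]
              have hih := ih (pos + inner.length + 1 + 1) (by omega) (by omega)
              rw [hdropp3] at hih
              by_cases hnil : PySem.Chars.stripChars inner pvWs = []
              · rw [if_pos hnil, if_pos hnil, hih]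
                congr 1
                funext t
                simp [hbr]
              · rw [if_neg hnil, if_neg hnil]
                by_cases hdig : PySem.Chars.isdigit (PySem.Chars.stripChars inner pvWs).head! = true
                · rw [if_pos hdig, if_pos hdig, hih]
                  congr 1
                  funext t
                  simp [hbr]
                · rw [if_neg hdig, if_neg hdig]
                  by_cases hbad : ('<' ∈ PySem.Chars.stripChars inner pvWs) ∨
                      ('>' ∈ PySem.Chars.stripChars inner pvWs)
                  · rw [if_pos hbad, if_pos hbad]
                  · rw [if_neg hbad, if_neg hbad]
                    cases hv : d.get? (String.mk (PySem.Chars.stripChars inner pvWs)) with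
                    | none => rfl
                    | some v => rw [hih]
            · -- no '}' after pos: the '{' stays literal
              have hmemt : '}' ∉ cs.drop pos := by
                rw [hdropc]
                simp only [List.mem_cons, not_or]
                exact ⟨by simp [hbr], hmem⟩
              rw [hff, pvFind_rbrace_of_not_mem _ hmemt]
              rw [if_pos (by norm_num), dif_pos (by norm_num)]
              rw [if_neg (by rw [pvTakeWhile_eq_self_of_not_mem _ hmem]; omega)]
              rw [ih (pos + 1) (by omega) (by omega)]
              simp [hbr]
          · -- ordinary character
            rw [if_pos (by simp [hbr]), if_neg hbr]
            rw [ih (pos + 1) (by omega) (by omega)]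
            rfl
      · rw [pvA_loop, dif_neg (by omega), List.drop_eq_nil_of_le (by omega), pvB_go]
  intro pos hpos
  exact main (cs.length - pos) pos le_rfl hpos

-- ===== VERDICT (by name: the statement is the Claim_ definition above) =====
theorem regex_expand_spec : Claim_equal_regex_expand := by
  intro macros pattern guarded _hdom _hpre
  unfold Spec_regex_expand regex_expand regex_expand_alt
  rw [pvLoop_eq (PySem.Dict.ofList macros) guarded pattern.toList 0 (by omega),
    List.drop_zero]
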